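-- pv_equiv track=rewrite | github.com/JSM-4xcry/JSM | m.py | lm
-- ===== SOURCE A (Python) =====
-- def test_m(months,year):
--         to=[1,3,5,7,8,10,12]
--         if months in  to:
--              months=31
--         elif months==2:
--              if  year==365 :
--                 months=29
--              else:
--                 months=28
--         else:
--              months=30
--         return months
--
-- def lm(year_days):
--     day=0
--     months=0
--     while year_days>0:
--         for i in range(1,13):
--             days=test_m(i,2024)
--         if year_days>=28:
--             year_days-=days
--             months+=1
--         else:
--             day=year_days+1
--             year_days=0
--     return months
-- ===== SOURCE B (Python) =====
-- def lm(year_days):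
--     # closed form: number of 31-subtractions starting >= 28
--     return max(0, (year_days - 28) // 31 + 1)
-- ===== Notes on version B (the rewrite author's own statement) =====
-- stated objective: faster
-- what changed: Replaces the subtract-31-in-a-loop counting (with its redundant inner 12-iteration month scan) by the closed form max(0, (year_days-28)//31 + 1).
import Mathlib
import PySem

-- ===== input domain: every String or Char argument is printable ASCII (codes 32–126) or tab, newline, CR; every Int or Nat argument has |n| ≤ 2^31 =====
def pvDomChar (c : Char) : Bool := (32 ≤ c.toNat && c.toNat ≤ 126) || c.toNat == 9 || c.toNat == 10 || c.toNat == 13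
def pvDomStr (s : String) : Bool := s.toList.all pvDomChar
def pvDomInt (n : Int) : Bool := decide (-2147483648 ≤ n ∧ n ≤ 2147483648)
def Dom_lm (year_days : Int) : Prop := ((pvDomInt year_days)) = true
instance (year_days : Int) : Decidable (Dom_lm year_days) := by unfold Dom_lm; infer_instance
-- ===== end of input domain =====

-- B replaces A's repeated subtraction loop by a closed form; equivalence of return values is proved for all Int inputs.

-- ===== PORT A =====
-- helper from the module, transliterated
def test_m (months year : Int) : Int :=
  if months ∈ ([1,3,5,7,8,10,12] : List Int) then 31
  else if months == 2 then (if year == 365 then 29 else 28)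
  else 30

-- the while loop of A; `day` is carried although never read after the loop, as in A.
-- `days0` is the current value of the (loop-assigned) variable `days`; the inner for-loop
-- over range(1,13) reassigns it twelve times, exactly as in A.
-- needed by lmLoop's termination proof (the inner for-loop leaves days = 31)
lemma days_eq_31 : (PySem.List.pyRange 1 13 1).foldl (fun _ i => test_m i 2024) 0 = 31 := by
  decide

def lmLoop (year_days day months : Int) : Int :=
  if h : year_days > 0 then
    let days := (PySem.List.pyRange 1 13 1).foldl (fun _ i => test_m i 2024) 0
    if year_days ≥ 28 then
      lmLoop (year_days - days) day (months + 1)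
    else
      lmLoop 0 (year_days + 1) months
  else months
termination_by year_days.toNat
decreasing_by
  · rw [days_eq_31]; omega
  · omega

def lm (year_days : Int) : Int := lmLoop year_days 0 0

-- ===== PORT B =====
def lm_alt (year_days : Int) : Int :=
  max 0 (PySem.Int.floordiv (year_days - 28) 31 + 1)

-- ===== PRECONDITION & SPEC =====
def Spec_lm (year_days : Int) (out : Int) : Prop := out = lm_alt year_days
instance (year_days : Int) (out : Int) : Decidable (Spec_lm year_days out) := by unfold Spec_lm; infer_instance

-- ===== CLAIM (what is proved, stated in full; the proofs are below) =====
def Claim_equal_lm : Prop := ∀ (year_days : Int), Dom_lm year_days → Spec_lm year_days (lm year_days)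

-- ===== LEMMAS AND PROOFS =====
lemma lmLoop_closed_aux (n : Nat) : ∀ (y d m : Int), y.toNat = n → lmLoop y d m = m + lm_alt y := by
  induction n using Nat.strong_induction_on with
  | _ n ih =>
    intro y d m hn
    rw [lmLoop]
    by_cases hy : y > 0
    · simp only [hy, dif_pos, days_eq_31]
      by_cases h28 : y ≥ 28
      · rw [if_pos h28, ih (y - 31).toNat (by omega) (y - 31) d (m + 1) rfl]
        have h1 := PySem.Int.floordiv_mul_add_mod (y - 28) 31
        have h2 := PySem.Int.mod_nonneg (y - 28) (b := 31) (by omega)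
        have h3 := PySem.Int.mod_lt (y - 28) (b := 31) (by omega)
        have h4 := PySem.Int.floordiv_mul_add_mod (y - 31 - 28) 31
        have h5 := PySem.Int.mod_nonneg (y - 31 - 28) (b := 31) (by omega)
        have h6 := PySem.Int.mod_lt (y - 31 - 28) (b := 31) (by omega)
        simp only [lm_alt]
        omega
      · rw [if_neg h28, ih 0 (by omega) 0 (y + 1) m rfl]
        have h1 := PySem.Int.floordiv_mul_add_mod (y - 28) 31
        have h2 := PySem.Int.mod_nonneg (y - 28) (b := 31) (by omega)
        have h3 := PySem.Int.mod_lt (y - 28) (b := 31) (by omega)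
        simp only [lm_alt]
        have : PySem.Int.floordiv ((0:Int) - 28) 31 = -1 := by decide
        omega
    · simp only [hy, dif_neg, not_false_iff]
      have h1 := PySem.Int.floordiv_mul_add_mod (y - 28) 31
      have h2 := PySem.Int.mod_nonneg (y - 28) (b := 31) (by omega)
      have h3 := PySem.Int.mod_lt (y - 28) (b := 31) (by omega)
      simp only [lm_alt]
      omega

lemma lmLoop_closed (y d m : Int) : lmLoop y d m = m + lm_alt y :=
  lmLoop_closed_aux y.toNat y d m rfl

-- ===== VERDICT (by name: the statement is the Claim_ definition above) =====
theorem lm_spec : Claim_equal_lm := by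
  intro y _
  show lm y = lm_alt y
  simp [lm, lmLoop_closed]
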